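-- pv_equiv track=rewrite | github.com/buff0k/safety | safety/safety/report/tmm_and_injury_per_shift/tmm_and_injury_per_shift.py | _sum_all_years
-- ===== SOURCE A (Python) =====
-- SHIFT_DAY_1 = "Day 1"
--
-- SHIFT_DAY_2 = "Day 2"
--
-- SHIFT_DAY_3 = "Day 3"
--
-- SHIFT_NIGHT_1 = "Night 1"
--
-- SHIFT_NIGHT_2 = "Night 2"
--
-- SHIFT_NIGHT_3 = "Night 3"
--
-- def _sum_all_years(matrix: dict, years: list[int]) -> dict[str, int]:
-- 	out = {SHIFT_DAY_1: 0, SHIFT_DAY_2: 0, SHIFT_DAY_3: 0, SHIFT_NIGHT_1: 0, SHIFT_NIGHT_2: 0, SHIFT_NIGHT_3: 0}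
-- 	for yy in years:
-- 		for mm in range(1, 13):
-- 			key = (yy, mm)
-- 			for shift in out.keys():
-- 				out[shift] += int(matrix.get(key, {}).get(shift, 0))
-- 	return out
-- ===== SOURCE B (Python) =====
-- SHIFT_DAY_1 = "Day 1"
-- SHIFT_DAY_2 = "Day 2"
-- SHIFT_DAY_3 = "Day 3"
-- SHIFT_NIGHT_1 = "Night 1"
-- SHIFT_NIGHT_2 = "Night 2"
-- SHIFT_NIGHT_3 = "Night 3"
--
-- def _sum_all_years(matrix: dict, years: list[int]) -> dict[str, int]:
-- 	# Multiplicity map of the requested years, then one pass over the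
-- 	# populated matrix cells instead of probing every (year, month) slot.
-- 	count = {}
-- 	for y in years:
-- 		count[y] = count.get(y, 0) + 1
-- 	d1 = d2 = d3 = n1 = n2 = n3 = 0
-- 	for (yy, mm), row in matrix.items():
-- 		c = count.get(yy, 0)
-- 		if c and 1 <= mm <= 12:
-- 			d1 += int(row.get(SHIFT_DAY_1, 0)) * c
-- 			d2 += int(row.get(SHIFT_DAY_2, 0)) * c
-- 			d3 += int(row.get(SHIFT_DAY_3, 0)) * c
-- 			n1 += int(row.get(SHIFT_NIGHT_1, 0)) * c
-- 			n2 += int(row.get(SHIFT_NIGHT_2, 0)) * c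
-- 			n3 += int(row.get(SHIFT_NIGHT_3, 0)) * c
-- 	return {SHIFT_DAY_1: d1, SHIFT_DAY_2: d2, SHIFT_DAY_3: d3,
-- 		SHIFT_NIGHT_1: n1, SHIFT_NIGHT_2: n2, SHIFT_NIGHT_3: n3}
-- ===== Notes on version B (the rewrite author's own statement) =====
-- stated objective: faster
-- what changed: B builds a multiplicity map of the requested years and makes one pass over the populated matrix entries (month restricted to 1..12, each row weighted by its year's multiplicity) into six scalar accumulators, instead of probing all |years|*12 grid cells and updating a dict of six counters per cell.
import Mathlib
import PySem

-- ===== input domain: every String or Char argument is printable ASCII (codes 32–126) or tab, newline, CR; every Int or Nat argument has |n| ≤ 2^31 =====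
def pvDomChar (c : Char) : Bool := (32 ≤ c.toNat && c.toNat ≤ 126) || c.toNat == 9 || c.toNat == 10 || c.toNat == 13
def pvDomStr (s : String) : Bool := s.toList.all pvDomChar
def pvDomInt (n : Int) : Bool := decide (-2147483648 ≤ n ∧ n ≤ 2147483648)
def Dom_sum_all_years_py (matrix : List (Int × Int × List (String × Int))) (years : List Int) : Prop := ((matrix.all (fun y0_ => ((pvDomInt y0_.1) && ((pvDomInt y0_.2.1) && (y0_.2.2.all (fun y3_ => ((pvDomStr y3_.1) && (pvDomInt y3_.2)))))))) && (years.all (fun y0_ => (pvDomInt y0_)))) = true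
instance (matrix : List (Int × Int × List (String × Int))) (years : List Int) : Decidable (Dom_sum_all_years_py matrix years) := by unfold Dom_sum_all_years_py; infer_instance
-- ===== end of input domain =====

-- B replaces A's probing of every (year, month) grid cell by one pass over the populated
-- matrix entries, weighted by a multiplicity map of the years (measured faster in a timing run).

-- ===== PORT A =====
-- row.get(shift, 0) on an inner dict (association list, first-match lookup)
def pvRowGet (row : List (String × Int)) (s : String) : Int :=
  match row.find? (fun p => p.1 == s) with
  | some p => p.2
  | none => 0

-- int(matrix.get((yy, mm), {}).get(shift, 0)): first-match lookup of the cell, default 0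
-- (int() is the identity on the Int values admitted here)
def pvCell (matrix : List (Int × Int × List (String × Int))) (yy mm : Int) (s : String) : Int :=
  match matrix.find? (fun e => e.1 == yy && e.2.1 == mm) with
  | some e => pvRowGet e.2.2 s
  | none => 0

def sum_all_years_py (matrix : List (Int × Int × List (String × Int))) (years : List Int) : List (String × Int) :=
  let out : PySem.Dict String Int :=
    PySem.Dict.mk [("Day 1", 0), ("Day 2", 0), ("Day 3", 0), ("Night 1", 0), ("Night 2", 0), ("Night 3", 0)]
  let out := years.foldl (fun out yy =>
    (PySem.List.pyRange 1 13 1).foldl (fun out mm =>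
      out.keys.foldl (fun out shift =>
        out.modify shift 0 (fun v => v + pvCell matrix yy mm shift)) out) out) out
  out.items

-- ===== PORT B =====
def pvKey (e : Int × Int × List (String × Int)) : Int × Int := (e.1, e.2.1)

-- matrix.items(): the distinct (year, month) keys in insertion order, each with its
-- first-match value (the association-list reading of iterating a Python dict)
def pvDedupAux (seen : List (Int × Int)) : List (Int × Int × List (String × Int)) → List (Int × Int × List (String × Int))
  | [] => []
  | e :: rest => if pvKey e ∈ seen then pvDedupAux seen rest else e :: pvDedupAux (pvKey e :: seen) rest

def pvDedup (matrix : List (Int × Int × List (String × Int))) : List (Int × Int × List (String × Int)) :=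
  pvDedupAux [] matrix

-- one iteration of B's loop body over a populated entry e, given the year-multiplicity map
def pvStep (count : PySem.Dict Int Int) (t : Int × Int × Int × Int × Int × Int)
    (e : Int × Int × List (String × Int)) : Int × Int × Int × Int × Int × Int :=
  let c := count.getD e.1 0
  if c ≠ 0 ∧ 1 ≤ e.2.1 ∧ e.2.1 ≤ 12 then
    (t.1 + pvRowGet e.2.2 "Day 1" * c,
     t.2.1 + pvRowGet e.2.2 "Day 2" * c,
     t.2.2.1 + pvRowGet e.2.2 "Day 3" * c,
     t.2.2.2.1 + pvRowGet e.2.2 "Night 1" * c,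
     t.2.2.2.2.1 + pvRowGet e.2.2 "Night 2" * c,
     t.2.2.2.2.2 + pvRowGet e.2.2 "Night 3" * c)
  else t

def sum_all_years_py_alt (matrix : List (Int × Int × List (String × Int))) (years : List Int) : List (String × Int) :=
  let count : PySem.Dict Int Int :=
    years.foldl (fun d y => d.insert y (d.getD y 0 + 1)) PySem.Dict.empty
  let t : Int × Int × Int × Int × Int × Int :=
    (pvDedup matrix).foldl (pvStep count) (0, 0, 0, 0, 0, 0)
  [("Day 1", t.1), ("Day 2", t.2.1), ("Day 3", t.2.2.1),
   ("Night 1", t.2.2.2.1), ("Night 2", t.2.2.2.2.1), ("Night 3", t.2.2.2.2.2)]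

-- ===== PRECONDITION & SPEC =====
def Spec_sum_all_years_py (matrix : List (Int × Int × List (String × Int))) (years : List Int) (out : List (String × Int)) : Prop := out = sum_all_years_py_alt matrix years
instance (matrix : List (Int × Int × List (String × Int))) (years : List Int) (out : List (String × Int)) : Decidable (Spec_sum_all_years_py matrix years out) := by unfold Spec_sum_all_years_py; infer_instance

-- ===== CLAIM (what is proved, stated in full; the proofs are below) =====
def Claim_equal_sum_all_years_py : Prop := ∀ (matrix : List (Int × Int × List (String × Int))) (years : List Int), Dom_sum_all_years_py matrix years → Spec_sum_all_years_py matrix years (sum_all_years_py matrix years)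

-- ===== LEMMAS AND PROOFS =====

def pvMonths : List Int := [1, 2, 3, 4, 5, 6, 7, 8, 9, 10, 11, 12]

def mkD (a b c d e f : Int) : PySem.Dict String Int :=
  PySem.Dict.mk [("Day 1", a), ("Day 2", b), ("Day 3", c), ("Night 1", d), ("Night 2", e), ("Night 3", f)]

-- weight B assigns to one (deduplicated) matrix entry
def pvW (years : List Int) (s : String) (e : Int × Int × List (String × Int)) : Int :=
  if 1 ≤ e.2.1 ∧ e.2.1 ≤ 12 then pvRowGet e.2.2 s * (years.count e.1 : Int) else 0

def pvS (D : List (Int × Int × List (String × Int))) (years : List Int) (s : String) : Int :=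
  (D.map (pvW years s)).sum

theorem months_eq : PySem.List.pyRange 1 13 1 = pvMonths := by decide

theorem find?_cons_pos {α : Type} (p : α → Bool) (a : α) (l : List α) (h : p a = true) :
    (a :: l).find? p = some a := by
  simp [List.find?, h]

theorem find?_cons_neg {α : Type} (p : α → Bool) (a : α) (l : List α) (h : p a = false) :
    (a :: l).find? p = l.find? p := by
  simp [List.find?, h]

theorem stepShift (h : String → Int) (a b c d e f : Int) :
    (mkD a b c d e f).keys.foldl (fun out shift => out.modify shift 0 (fun v => v + h shift)) (mkD a b c d e f)
    = mkD (a + h "Day 1") (b + h "Day 2") (c + h "Day 3") (d + h "Night 1") (e + h "Night 2") (f + h "Night 3") := by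
  simp [mkD, PySem.Dict.keys, PySem.Dict.modify, PySem.Dict.insert, PySem.Dict.getD,
        PySem.Dict.get?, PySem.Dict.contains, List.foldl]

theorem monthLoop (matrix : List (Int × Int × List (String × Int))) (yy : Int) (L : List Int)
    (a b c d e f : Int) :
    L.foldl (fun out mm => out.keys.foldl (fun out shift =>
        out.modify shift 0 (fun v => v + pvCell matrix yy mm shift)) out) (mkD a b c d e f)
    = mkD (a + (L.map (fun mm => pvCell matrix yy mm "Day 1")).sum)
          (b + (L.map (fun mm => pvCell matrix yy mm "Day 2")).sum)
          (c + (L.map (fun mm => pvCell matrix yy mm "Day 3")).sum)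
          (d + (L.map (fun mm => pvCell matrix yy mm "Night 1")).sum)
          (e + (L.map (fun mm => pvCell matrix yy mm "Night 2")).sum)
          (f + (L.map (fun mm => pvCell matrix yy mm "Night 3")).sum) := by
  induction L generalizing a b c d e f with
  | nil => simp
  | cons m L ih =>
    rw [List.foldl_cons, stepShift (fun shift => pvCell matrix yy m shift), ih]
    simp [mkD, add_assoc]

theorem yearLoop (matrix : List (Int × Int × List (String × Int))) (Y : List Int)
    (a b c d e f : Int) :
    Y.foldl (fun out yy => pvMonths.foldl (fun out mm => out.keys.foldl (fun out shift =>
        out.modify shift 0 (fun v => v + pvCell matrix yy mm shift)) out) out) (mkD a b c d e f)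
    = mkD (a + (Y.map (fun yy => (pvMonths.map (fun mm => pvCell matrix yy mm "Day 1")).sum)).sum)
          (b + (Y.map (fun yy => (pvMonths.map (fun mm => pvCell matrix yy mm "Day 2")).sum)).sum)
          (c + (Y.map (fun yy => (pvMonths.map (fun mm => pvCell matrix yy mm "Day 3")).sum)).sum)
          (d + (Y.map (fun yy => (pvMonths.map (fun mm => pvCell matrix yy mm "Night 1")).sum)).sum)
          (e + (Y.map (fun yy => (pvMonths.map (fun mm => pvCell matrix yy mm "Night 2")).sum)).sum)
          (f + (Y.map (fun yy => (pvMonths.map (fun mm => pvCell matrix yy mm "Night 3")).sum)).sum) := by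
  induction Y generalizing a b c d e f with
  | nil => simp
  | cons y Y ih =>
    rw [List.foldl_cons, monthLoop, ih]
    simp [mkD, add_assoc]

theorem A_closed (matrix : List (Int × Int × List (String × Int))) (years : List Int) :
    sum_all_years_py matrix years
    = [("Day 1", (years.map (fun yy => (pvMonths.map (fun mm => pvCell matrix yy mm "Day 1")).sum)).sum),
       ("Day 2", (years.map (fun yy => (pvMonths.map (fun mm => pvCell matrix yy mm "Day 2")).sum)).sum),
       ("Day 3", (years.map (fun yy => (pvMonths.map (fun mm => pvCell matrix yy mm "Day 3")).sum)).sum),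
       ("Night 1", (years.map (fun yy => (pvMonths.map (fun mm => pvCell matrix yy mm "Night 1")).sum)).sum),
       ("Night 2", (years.map (fun yy => (pvMonths.map (fun mm => pvCell matrix yy mm "Night 2")).sum)).sum),
       ("Night 3", (years.map (fun yy => (pvMonths.map (fun mm => pvCell matrix yy mm "Night 3")).sum)).sum)] := by
  have h0 : PySem.Dict.mk [("Day 1", (0:Int)), ("Day 2", 0), ("Day 3", 0), ("Night 1", 0), ("Night 2", 0), ("Night 3", 0)] = mkD 0 0 0 0 0 0 := rfl
  simp only [sum_all_years_py, months_eq, h0]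
  rw [yearLoop]
  simp [mkD]

theorem countD (years : List Int) (y : Int) :
    (years.foldl (fun d y => d.insert y (d.getD y 0 + 1)) PySem.Dict.empty).getD y 0
    = (years.count y : Int) := by
  rw [PySem.Dict.getD_foldl_insert_add_one]
  simp [PySem.Dict.getD_empty]

theorem pvStep_eq (years : List Int) (t : Int × Int × Int × Int × Int × Int)
    (e : Int × Int × List (String × Int)) :
    pvStep (years.foldl (fun d y => d.insert y (d.getD y 0 + 1)) PySem.Dict.empty) t e
    = if (years.count e.1 : Int) ≠ 0 ∧ 1 ≤ e.2.1 ∧ e.2.1 ≤ 12 then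
        (t.1 + pvRowGet e.2.2 "Day 1" * (years.count e.1 : Int),
         t.2.1 + pvRowGet e.2.2 "Day 2" * (years.count e.1 : Int),
         t.2.2.1 + pvRowGet e.2.2 "Day 3" * (years.count e.1 : Int),
         t.2.2.2.1 + pvRowGet e.2.2 "Night 1" * (years.count e.1 : Int),
         t.2.2.2.2.1 + pvRowGet e.2.2 "Night 2" * (years.count e.1 : Int),
         t.2.2.2.2.2 + pvRowGet e.2.2 "Night 3" * (years.count e.1 : Int))
      else t := by
  unfold pvStep
  simp only [countD]

theorem foldB (years : List Int) (L : List (Int × Int × List (String × Int)))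
    (t : Int × Int × Int × Int × Int × Int) :
    L.foldl (pvStep (years.foldl (fun d y => d.insert y (d.getD y 0 + 1)) PySem.Dict.empty)) t
    = (t.1 + pvS L years "Day 1", t.2.1 + pvS L years "Day 2", t.2.2.1 + pvS L years "Day 3",
       t.2.2.2.1 + pvS L years "Night 1", t.2.2.2.2.1 + pvS L years "Night 2",
       t.2.2.2.2.2 + pvS L years "Night 3") := by
  induction L generalizing t with
  | nil => simp [pvS]
  | cons e L ih =>
    rw [List.foldl_cons, pvStep_eq]
    by_cases h : ((years.count e.1 : Int) ≠ 0 ∧ 1 ≤ e.2.1 ∧ e.2.1 ≤ 12)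
    · rw [if_pos h, ih]
      simp [pvS, pvW, h.2.1, h.2.2, add_assoc]
    · rw [if_neg h, ih]
      have hw : ∀ s, pvW years s e = 0 := by
        intro s
        unfold pvW
        by_cases hr : 1 ≤ e.2.1 ∧ e.2.1 ≤ 12
        · have hc : (years.count e.1 : Int) = 0 := by
            by_contra hc
            exact h ⟨hc, hr⟩
          simp [hr, hc]
        · simp [hr]
      simp [pvS, hw]

theorem B_closed (matrix : List (Int × Int × List (String × Int))) (years : List Int) :
    sum_all_years_py_alt matrix years
    = [("Day 1", pvS (pvDedup matrix) years "Day 1"), ("Day 2", pvS (pvDedup matrix) years "Day 2"),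
       ("Day 3", pvS (pvDedup matrix) years "Day 3"), ("Night 1", pvS (pvDedup matrix) years "Night 1"),
       ("Night 2", pvS (pvDedup matrix) years "Night 2"), ("Night 3", pvS (pvDedup matrix) years "Night 3")] := by
  simp only [sum_all_years_py_alt]
  rw [foldB]
  simp

-- dedup preserves first-match lookup
theorem find?_dedupAux (m : List (Int × Int × List (String × Int))) :
    ∀ (seen : List (Int × Int)) (yy mm : Int), (yy, mm) ∉ seen →
    (pvDedupAux seen m).find? (fun e => e.1 == yy && e.2.1 == mm)
      = m.find? (fun e => e.1 == yy && e.2.1 == mm) := by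
  induction m with
  | nil => intro seen yy mm _; rfl
  | cons e rest ih =>
    intro seen yy mm h
    by_cases hk : pvKey e ∈ seen
    · simp only [pvDedupAux, if_pos hk]
      have hpe : (e.1 == yy && e.2.1 == mm) = false := by
        rw [Bool.eq_false_iff]
        intro hb
        simp only [Bool.and_eq_true, beq_iff_eq] at hb
        exact h (by rw [← hb.1, ← hb.2]; exact hk)
      rw [find?_cons_neg (fun q => q.1 == yy && q.2.1 == mm) e rest hpe]
      exact ih seen yy mm h
    · simp only [pvDedupAux, if_neg hk]
      by_cases hp : (e.1 == yy && e.2.1 == mm) = true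
      · rw [find?_cons_pos (fun q => q.1 == yy && q.2.1 == mm) e (pvDedupAux (pvKey e :: seen) rest) hp,
            find?_cons_pos (fun q => q.1 == yy && q.2.1 == mm) e rest hp]
      · rw [Bool.not_eq_true] at hp
        rw [find?_cons_neg (fun q => q.1 == yy && q.2.1 == mm) e (pvDedupAux (pvKey e :: seen) rest) hp,
            find?_cons_neg (fun q => q.1 == yy && q.2.1 == mm) e rest hp]
        apply ih
        intro hmem
        rcases List.mem_cons.mp hmem with h1 | h1
        · rw [Bool.eq_false_iff] at hp
          apply hp
          have h2 : pvKey e = (yy, mm) := h1.symm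
          simp only [pvKey, Prod.mk.injEq] at h2
          simp [h2.1, h2.2]
        · exact h h1

theorem cell_dedup (matrix : List (Int × Int × List (String × Int))) (yy mm : Int) (s : String) :
    pvCell (pvDedup matrix) yy mm s = pvCell matrix yy mm s := by
  unfold pvCell pvDedup
  rw [find?_dedupAux matrix [] yy mm (List.not_mem_nil)]

theorem mem_keys_dedupAux (m : List (Int × Int × List (String × Int))) :
    ∀ (seen : List (Int × Int)) (k : Int × Int), k ∈ (pvDedupAux seen m).map pvKey → k ∉ seen := by
  induction m with
  | nil => intro seen k h; simp [pvDedupAux] at h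
  | cons e rest ih =>
    intro seen k h
    by_cases hk : pvKey e ∈ seen
    · simp only [pvDedupAux, if_pos hk] at h
      exact ih seen k h
    · simp only [pvDedupAux, if_neg hk, List.map_cons, List.mem_cons] at h
      rcases h with h | h
      · rw [h]; exact hk
      · have := ih (pvKey e :: seen) k h
        intro hmem
        exact this (List.mem_cons_of_mem _ hmem)

theorem nodup_keys_dedupAux (m : List (Int × Int × List (String × Int))) :
    ∀ (seen : List (Int × Int)), ((pvDedupAux seen m).map pvKey).Nodup := by
  induction m with
  | nil => intro seen; simp [pvDedupAux]
  | cons e rest ih =>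
    intro seen
    by_cases hk : pvKey e ∈ seen
    · simp only [pvDedupAux, if_pos hk]
      exact ih seen
    · simp only [pvDedupAux, if_neg hk, List.map_cons]
      refine List.nodup_cons.mpr ⟨?_, ih (pvKey e :: seen)⟩
      intro hmem
      exact mem_keys_dedupAux rest (pvKey e :: seen) (pvKey e) hmem (List.mem_cons_self)

theorem cell_of_not_mem (D : List (Int × Int × List (String × Int))) (yy mm : Int) (s : String)
    (h : (yy, mm) ∉ D.map pvKey) : pvCell D yy mm s = 0 := by
  unfold pvCell
  have hf : D.find? (fun e => e.1 == yy && e.2.1 == mm) = none := by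
    rw [List.find?_eq_none]
    intro x hx hb
    simp only [Bool.and_eq_true, beq_iff_eq] at hb
    exact h (List.mem_map.mpr ⟨x, hx, by simp [pvKey, hb.1, hb.2]⟩)
  rw [hf]

theorem sum_map_add {α : Type} (l : List α) (f g : α → Int) :
    (l.map (fun x => f x + g x)).sum = (l.map f).sum + (l.map g).sum := by
  induction l with
  | nil => simp
  | cons a l ih => simp [ih]; ring

theorem sum_if_count (l : List Int) (c w : Int) :
    (l.map (fun y => if y = c then w else 0)).sum = (l.count c : Int) * w := by
  induction l with
  | nil => simp
  | cons a l ih =>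
    by_cases h : a = c <;> simp [h, ih] <;> ring

theorem sum_if_mem (l : List Int) (hl : l.Nodup) (c v : Int) :
    (l.map (fun x => if x = c then v else 0)).sum = if c ∈ l then v else 0 := by
  induction l with
  | nil => simp
  | cons a l ih =>
    obtain ⟨ha, hl'⟩ := List.nodup_cons.mp hl
    by_cases h : a = c
    · subst h
      have h0 : (l.map (fun x => if x = a then v else 0)).sum = 0 := by
        apply List.sum_eq_zero
        intro x hx
        rcases List.mem_map.mp hx with ⟨y, hy, hxy⟩
        rw [← hxy, if_neg (by rintro rfl; exact ha hy)]
      simp [h0]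
    · have hmem : (c ∈ a :: l) ↔ c ∈ l := by
        constructor
        · intro hc
          rcases List.mem_cons.mp hc with h1 | h1
          · exact absurd h1.symm h
          · exact h1
        · exact List.mem_cons_of_mem a
      simp [h, ih hl', hmem]

theorem mem_months (c : Int) : c ∈ pvMonths ↔ (1 ≤ c ∧ c ≤ 12) := by
  simp [pvMonths]; omega

theorem grid (years : List Int) (s : String) :
    ∀ (D : List (Int × Int × List (String × Int))), (D.map pvKey).Nodup →
    (years.map (fun yy => (pvMonths.map (fun mm => pvCell D yy mm s)).sum)).sum = pvS D years s := by
  intro D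
  induction D with
  | nil =>
    intro _
    have h0 : ∀ yy mm, pvCell ([] : List (Int × Int × List (String × Int))) yy mm s = 0 := by
      intro yy mm; rfl
    simp [h0, pvS]
  | cons e rest ih =>
    intro hD
    rw [List.map_cons, List.nodup_cons] at hD
    obtain ⟨hk, hrest⟩ := hD
    have hcell : ∀ yy mm, pvCell (e :: rest) yy mm s
        = (if yy = e.1 ∧ mm = e.2.1 then pvRowGet e.2.2 s else 0) + pvCell rest yy mm s := by
      intro yy mm
      by_cases hp : yy = e.1 ∧ mm = e.2.1
      · have hpe : (e.1 == yy && e.2.1 == mm) = true := by simp [hp.1, hp.2]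
        have h0 : pvCell rest yy mm s = 0 := by
          apply cell_of_not_mem
          rw [hp.1, hp.2]
          exact hk
        rw [h0, if_pos hp]
        unfold pvCell
        rw [find?_cons_pos (fun q => q.1 == yy && q.2.1 == mm) e rest hpe]
        simp
      · have hpe : (e.1 == yy && e.2.1 == mm) = false := by
          rw [Bool.eq_false_iff]
          intro hb
          simp only [Bool.and_eq_true, beq_iff_eq] at hb
          exact hp ⟨hb.1.symm, hb.2.symm⟩
        rw [if_neg hp, zero_add]
        unfold pvCell
        rw [find?_cons_neg (fun q => q.1 == yy && q.2.1 == mm) e rest hpe]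
    simp only [hcell]
    have hsplit : ∀ yy, (pvMonths.map (fun mm =>
        (if yy = e.1 ∧ mm = e.2.1 then pvRowGet e.2.2 s else 0) + pvCell rest yy mm s)).sum
        = (pvMonths.map (fun mm => if yy = e.1 ∧ mm = e.2.1 then pvRowGet e.2.2 s else 0)).sum
          + (pvMonths.map (fun mm => pvCell rest yy mm s)).sum :=
      fun yy => sum_map_add pvMonths _ _
    simp only [hsplit]
    rw [sum_map_add]
    rw [ih hrest]
    have hinner : ∀ yy, (pvMonths.map (fun mm =>
        if yy = e.1 ∧ mm = e.2.1 then pvRowGet e.2.2 s else 0)).sum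
        = if yy = e.1 then (if 1 ≤ e.2.1 ∧ e.2.1 ≤ 12 then pvRowGet e.2.2 s else 0) else 0 := by
      intro yy
      by_cases hy : yy = e.1
      · rw [if_pos hy]
        simp only [hy, true_and]
        rw [sum_if_mem pvMonths (by decide) e.2.1 (pvRowGet e.2.2 s)]
        simp only [mem_months]
      · simp [hy]
    simp only [hinner]
    rw [sum_if_count years e.1 _]
    have hhead : (years.count e.1 : Int) * (if 1 ≤ e.2.1 ∧ e.2.1 ≤ 12 then pvRowGet e.2.2 s else 0)
        = pvW years s e := by
      unfold pvW
      split_ifs <;> ring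
    rw [hhead]
    simp [pvS]

theorem sum_all_years_py_main (matrix : List (Int × Int × List (String × Int))) (years : List Int) :
    sum_all_years_py matrix years = sum_all_years_py_alt matrix years := by
  rw [A_closed, B_closed]
  have hc : ∀ s yy mm, pvCell matrix yy mm s = pvCell (pvDedup matrix) yy mm s :=
    fun s yy mm => (cell_dedup matrix yy mm s).symm
  have hg : ∀ s, (years.map (fun yy => (pvMonths.map (fun mm => pvCell matrix yy mm s)).sum)).sum
      = pvS (pvDedup matrix) years s := by
    intro s
    simp only [hc s]
    exact grid years s (pvDedup matrix) (nodup_keys_dedupAux matrix [])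
  simp only [hg]

-- ===== VERDICT (by name: the statement is the Claim_ definition above) =====
theorem sum_all_years_py_spec : Claim_equal_sum_all_years_py := by
  intro matrix years _
  exact sum_all_years_py_main matrix years
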